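-- pv_equiv track=rewrite | github.com/Andrewang492/mySpotify | waitTimeManager.py | __indexOfSmallestOver
-- ===== SOURCE A (Python) =====
-- def __indexOfSmallestOver(x, valuesList):
--     if valuesList[len(valuesList)-1] < x:
--         return -1
--     n = len(valuesList)
--     lo = 0
--     hi = n - 1
--     mid = (hi+lo)//2
--     while lo <= hi:
--         if valuesList[mid] >= x:
--             if hi == mid:
--                 break
--             hi = mid
--         else:
--             lo = mid + 1
--         mid = (hi+lo)//2
--     if valuesList[lo] >= x:
--         return lo
--     return hi
-- ===== SOURCE B (Python) =====
-- def __indexOfSmallestOver(x, valuesList):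
--     # Linear first-match scan instead of A's binary search; same guard so the
--     # empty list still raises IndexError and the no-element-case returns -1.
--     if valuesList[-1] < x:
--         return -1
--     for i, v in enumerate(valuesList):
--         if v >= x:
--             return i
--     return -1  # unreachable on sorted input (the guard ensured last >= x)
-- ===== Notes on version B (the rewrite author's own statement) =====
-- stated objective: simpler
-- what changed: Replaces the hand-rolled binary search (lo/hi/mid loop with a break and a post-loop fixup) by a single linear first-match scan; both return the smallest index whose value is >= x on sorted input.
-- outside the precondition, e.g. on __indexOfSmallestOver(2, [5, 1, 2]): A returns 2, B returns 0
import Mathlib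
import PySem

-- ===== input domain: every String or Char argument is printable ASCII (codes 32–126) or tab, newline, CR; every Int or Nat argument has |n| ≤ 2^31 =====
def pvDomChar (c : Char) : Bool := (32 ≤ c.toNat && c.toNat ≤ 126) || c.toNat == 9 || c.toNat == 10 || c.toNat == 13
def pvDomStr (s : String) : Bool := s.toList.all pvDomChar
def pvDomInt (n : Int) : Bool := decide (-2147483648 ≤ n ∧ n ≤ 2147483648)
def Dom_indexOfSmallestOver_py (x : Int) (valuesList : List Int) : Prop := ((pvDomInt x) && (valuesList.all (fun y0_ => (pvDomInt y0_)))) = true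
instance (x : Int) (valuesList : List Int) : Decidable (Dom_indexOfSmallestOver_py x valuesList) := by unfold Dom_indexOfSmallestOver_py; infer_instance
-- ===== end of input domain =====

-- B replaces A's hand-rolled binary search by a linear first-match scan (simpler, same result on sorted input).

-- ===== PORT A =====
-- the while loop of A: state (lo, hi); mid is recomputed from (lo, hi) exactly as Python does
-- at loop entry and after each body; the post-loop 'if valuesList[lo] >= x' is inlined at both exits.
-- indices are in range under Pre_, so pyGetD's default 0 is never used.
def pvLoopA (x : Int) (vs : List Int) : Nat → Int → Int → Int
  | 0, lo, hi =>
    -- fuel exhausted: cannot happen when called with fuel > hi - lo (the loop shrinks hi - lo each turn)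
    if x ≤ PySem.List.pyGetD vs lo 0 then lo else hi
  | fuel + 1, lo, hi =>
    if lo ≤ hi then
      let mid := PySem.Int.floordiv (hi + lo) 2
      if x ≤ PySem.List.pyGetD vs mid 0 then
        if hi = mid then
          -- break
          if x ≤ PySem.List.pyGetD vs lo 0 then lo else hi
        else pvLoopA x vs fuel lo mid
      else pvLoopA x vs fuel (mid + 1) hi
    else
      if x ≤ PySem.List.pyGetD vs lo 0 then lo else hi

def indexOfSmallestOver_py (x : Int) (valuesList : List Int) : Int :=
  match PySem.List.pyGet? valuesList ((valuesList.length : Int) - 1) with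
  | none => 0   -- IndexError (empty list): excluded by Pre_
  | some last => if last < x then -1 else pvLoopA x valuesList valuesList.length 0 ((valuesList.length : Int) - 1)

-- ===== PORT B =====
def pvScanB (x : Int) : List Int → Int → Int
  | [], _ => -1
  | v :: rest, i => if x ≤ v then i else pvScanB x rest (i + 1)

def indexOfSmallestOver_py_alt (x : Int) (valuesList : List Int) : Int :=
  match PySem.List.pyGet? valuesList (-1) with
  | none => 0   -- IndexError (empty list): excluded by Pre_
  | some last => if last < x then -1 else pvScanB x valuesList 0

-- ===== PRECONDITION & SPEC =====
-- Pre_ excludes the empty list (A raises IndexError there) and the unsorted lists on which the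
-- answer is not forced: binary search's contract is sorted input, and on such unsorted lists A's
-- returned index is an accident of the probe sequence (see cites), while B returns the first match.
-- (Unsorted lists whose last element is < x, or all of whose elements are ≥ x, stay inside Pre_.)
def Pre_indexOfSmallestOver_py (x : Int) (valuesList : List Int) : Prop :=
  valuesList ≠ [] ∧
    (List.Pairwise (· ≤ ·) valuesList ∨
      (∃ l, valuesList.getLast? = some l ∧ l < x) ∨
      (∀ v ∈ valuesList, x ≤ v))
instance (x : Int) (valuesList : List Int) : Decidable (Pre_indexOfSmallestOver_py x valuesList) := by
  unfold Pre_indexOfSmallestOver_py; infer_instance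

def pvWitness_indexOfSmallestOver_py : Int × List Int := (2, [1, 2, 2, 5])

def Spec_indexOfSmallestOver_py (x : Int) (valuesList : List Int) (out : Int) : Prop := out = indexOfSmallestOver_py_alt x valuesList
instance (x : Int) (valuesList : List Int) (out : Int) : Decidable (Spec_indexOfSmallestOver_py x valuesList out) := by unfold Spec_indexOfSmallestOver_py; infer_instance

-- ===== CLAIM (what is proved, stated in full; the proofs are below) =====
def Claim_equal_indexOfSmallestOver_py : Prop := ∀ (x : Int) (valuesList : List Int), Dom_indexOfSmallestOver_py x valuesList → Pre_indexOfSmallestOver_py x valuesList → Spec_indexOfSmallestOver_py x valuesList (indexOfSmallestOver_py x valuesList)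

-- ===== LEMMAS AND PROOFS =====

theorem pvScanB_eq (x : Int) : ∀ (l : List Int) (i : Int) (m : Nat) (hm : m < l.length),
    x ≤ l[m] → (∀ j (hj : j < m), l[j] < x) → pvScanB x l i = i + m := by
  intro l
  induction l with
  | nil => intro i m hm; exact absurd hm (by simp)
  | cons v rest ih =>
    intro i m hm hx hmin
    by_cases hv : x ≤ v
    · have hm0 : m = 0 := by
        by_contra h
        exact absurd hv (not_le.mpr (hmin 0 (by omega)))
      simp [pvScanB, hv, hm0]
    · match m with
      | 0 => simp at hx; omega
      | m' + 1 =>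
        have := ih (i + 1) m' (by simpa using hm) (by simpa using hx)
          (fun j hj => by simpa using hmin (j + 1) (by omega))
        simp only [pvScanB, if_neg hv, this]
        push_cast; ring

theorem pvLoopA_eq (x : Int) (vs : List Int)
    (m : Nat) (hm : m < vs.length) (hmx : x ≤ vs[m]) (hmin : ∀ j (hj : j < m), vs[j] < x)
    (hup : ∀ (j : Nat) (hj : j < vs.length), m ≤ j → x ≤ vs[j]) :
    ∀ (fuel : Nat) (lo hi : Int), (hi - lo).toNat < fuel → 0 ≤ lo → lo ≤ (m : Int) →
      (m : Int) ≤ hi → hi < vs.length → pvLoopA x vs fuel lo hi = m := by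
  intro fuel
  induction fuel with
  | zero => intro lo hi hf; omega
  | succ fuel ih =>
    intro lo hi hf h0 hlm hmh hhl
    have hlohi : lo ≤ hi := le_trans hlm hmh
    have hmidb := PySem.Int.floordiv_two_mid_bounds hlohi
    rw [pvLoopA]
    simp only [if_pos hlohi]
    set mid := PySem.Int.floordiv (hi + lo) 2 with hmid
    rw [add_comm hi lo] at hmid
    have hml : lo ≤ mid := by rw [hmid]; exact hmidb.1
    have hmr : mid ≤ hi := by rw [hmid]; exact hmidb.2
    have hmidrange : 0 ≤ mid ∧ mid < vs.length := ⟨le_trans h0 hml, lt_of_le_of_lt hmr hhl⟩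
    have hgetmid : PySem.List.pyGetD vs mid 0 = vs[mid.toNat]'(by omega) :=
      PySem.List.pyGetD_eq_getElem vs 0 hmidrange.1 hmidrange.2
    by_cases hge : x ≤ PySem.List.pyGetD vs mid 0
    · -- vs[mid] ≥ x, hence m ≤ mid
      have hmmid : (m : Int) ≤ mid := by
        by_contra h
        have : vs[mid.toNat]'(by omega) < x := hmin mid.toNat (by omega)
        rw [hgetmid] at hge; omega
      by_cases heq : hi = mid
      · -- break: mid = (lo+hi)//2 = hi forces lo = hi, hence m = lo
        have : lo = hi := by
          have := PySem.Int.floordiv_eq_ediv_of_pos (a := lo + hi) (b := 2) (by omega)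
          rw [hmid, this] at heq; omega
        have hml' : (m : Int) = lo := by omega
        have hglo : PySem.List.pyGetD vs lo 0 = vs[m] := by
          rw [PySem.List.pyGetD_eq_getElem vs 0 h0 (by omega)]
          congr 1; omega
        simp only [if_pos hge, if_pos heq, hglo, if_pos hmx]
        omega
      · simp only [if_pos hge, if_neg heq]
        exact ih lo mid (by omega) h0 hlm hmmid (by omega)
    · -- vs[mid] < x, hence mid < m
      have hmidm : mid < (m : Int) := by
        by_contra h
        have : x ≤ vs[mid.toNat]'(by omega) := hup mid.toNat (by omega) (by omega)
        rw [hgetmid] at hge; omega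
      simp only [if_neg hge]
      exact ih (mid + 1) hi (by omega) (by omega) (by omega) hmh hhl

-- ===== VERDICT (by name: the statement is the Claim_ definition above) =====
theorem indexOfSmallestOver_py_spec : Claim_equal_indexOfSmallestOver_py := by
  intro x vs _dom hpre
  obtain ⟨hne, hpre⟩ := hpre
  have hlen : 0 < vs.length := List.length_pos_iff.mpr hne
  have ht : ((vs.length : Int) - 1).toNat = vs.length - 1 := by omega
  have hA : PySem.List.pyGet? vs ((vs.length : Int) - 1) = some (vs[vs.length - 1]'(by omega)) := by
    rw [PySem.List.pyGet?_eq_some_getElem vs (by omega) (by omega)]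
    simp only [ht]
  have hB : PySem.List.pyGet? vs (-1) = some (vs[vs.length - 1]'(by omega)) := by
    rw [PySem.List.pyGet?_neg_one, List.getLast?_eq_getElem?, List.getElem?_eq_getElem (by omega)]
  unfold Spec_indexOfSmallestOver_py indexOfSmallestOver_py indexOfSmallestOver_py_alt
  simp only [hA, hB]
  by_cases hlast : vs[vs.length - 1]'(by omega) < x
  · simp [hlast]
  · simp only [if_neg hlast]
    -- produce the first index m with value ≥ x, together with the facts the two lemmas need
    obtain ⟨m, hmlt, hmx, hmin, hup⟩ :
        ∃ (m : Nat) (hmlt : m < vs.length), x ≤ vs[m] ∧ (∀ j (hj : j < m), vs[j] < x) ∧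
          (∀ (j : Nat) (hj : j < vs.length), m ≤ j → x ≤ vs[j]) := by
      rcases hpre with hpair | ⟨l, hl, hlx⟩ | hall
      · -- sorted list: the first index found by a scan
        have hsort : ∀ (i j : Nat) (hi : i < vs.length) (hj : j < vs.length), i ≤ j → vs[i] ≤ vs[j] := by
          intro i j hi hj hij
          rcases Nat.lt_or_eq_of_le hij with h | h
          · exact List.pairwise_iff_getElem.mp hpair i j hi hj h
          · subst h; exact le_refl _
        have hex : ∃ v ∈ vs, decide (x ≤ v) = true := by
          exact ⟨vs[vs.length - 1]'(by omega), List.getElem_mem _, by simpa using not_lt.mp hlast⟩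
        have hmlt : vs.findIdx (fun v => decide (x ≤ v)) < vs.length :=
          List.findIdx_lt_length.mpr hex
        refine ⟨vs.findIdx (fun v => decide (x ≤ v)), hmlt, ?_, ?_, ?_⟩
        · have := List.findIdx_getElem (w := hmlt); simpa using this
        · intro j hj
          have := List.not_of_lt_findIdx (p := fun v => decide (x ≤ v)) (xs := vs) hj
          simpa using this
        · intro j hj hmj
          have := List.findIdx_getElem (w := hmlt)
          exact le_trans (by simpa using this) (hsort _ j hmlt hj hmj)
      · -- last element < x: contradicts the guard we are in
        rw [List.getLast?_eq_getElem?, List.getElem?_eq_getElem (by omega)] at hl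
        simp only [Option.some.injEq] at hl
        omega
      · -- every element ≥ x: the first index is 0
        exact ⟨0, by omega, hall _ (List.getElem_mem _), fun j hj => by omega,
          fun j hj _ => hall _ (List.getElem_mem _)⟩
    rw [pvLoopA_eq x vs m hmlt hmx hmin hup vs.length 0 ((vs.length : Int) - 1) (by omega)
      (by omega) (by omega) (by omega) (by omega)]
    rw [pvScanB_eq x vs 0 m hmlt hmx hmin]
    omega
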